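-- pv_equiv track=rewrite | github.com/ToderitaLoredana/AA | Lab2/sorting_lab.py | _gen_heap_sort
-- ===== SOURCE A (Python) =====
-- def _gen_heap_sort(arr):
--     n = len(arr)
--     for i in range(n // 2 - 1, -1, -1):
--         yield from _gen_heapify(arr, n, i)
--     for i in range(n - 1, 0, -1):
--         arr[0], arr[i] = arr[i], arr[0]
--         yield arr.copy(), 0, i
--         yield from _gen_heapify(arr, i, 0)
--
-- def _gen_heapify(arr, n, i):
--     largest = i
--     l = 2 * i + 1
--     r = 2 * i + 2
--     if l < n and arr[l] > arr[largest]: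
--         largest = l
--     if r < n and arr[r] > arr[largest]:
--         largest = r
--     if largest != i:
--         arr[i], arr[largest] = arr[largest], arr[i]
--         yield arr.copy(), i, largest
--         yield from _gen_heapify(arr, n, largest)
-- ===== SOURCE B (Python) =====
-- def _gen_heap_sort(arr):
--     n = len(arr)
--     for start in range(n // 2 - 1, -1, -1):
--         yield from _sift_down(arr, start, n)
--     for end in range(n - 1, 0, -1):
--         arr[0], arr[end] = arr[end], arr[0]
--         yield arr.copy(), 0, end
--         yield from _sift_down(arr, 0, end)
--
-- def _sift_down(arr, i, n):
--     while True:
--         largest, l, r = i, 2 * i + 1, 2 * i + 2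
--         if l < n and arr[l] > arr[largest]:
--             largest = l
--         if r < n and arr[r] > arr[largest]:
--             largest = r
--         if largest == i:
--             return
--         arr[i], arr[largest] = arr[largest], arr[i]
--         yield arr.copy(), i, largest
--         i = largest
-- ===== Notes on version B (the rewrite author's own statement) =====
-- stated objective: alternative
-- what changed: A's recursive _gen_heapify is replaced by an iterative sift-down while-loop that updates the index in place; the two outer loops are kept and the exact same snapshot sequence is yielded.
import Mathlib
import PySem

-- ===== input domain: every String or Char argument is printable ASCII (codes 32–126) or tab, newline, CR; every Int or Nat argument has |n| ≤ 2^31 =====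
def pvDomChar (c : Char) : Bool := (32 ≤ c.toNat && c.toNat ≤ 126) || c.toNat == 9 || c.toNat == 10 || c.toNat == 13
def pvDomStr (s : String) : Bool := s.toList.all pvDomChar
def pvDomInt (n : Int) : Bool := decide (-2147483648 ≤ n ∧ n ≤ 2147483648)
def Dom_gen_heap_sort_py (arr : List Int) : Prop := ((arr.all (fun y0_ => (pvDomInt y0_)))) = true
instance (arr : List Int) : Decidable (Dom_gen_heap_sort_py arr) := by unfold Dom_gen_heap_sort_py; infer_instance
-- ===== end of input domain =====

-- B replaces A's recursive heapify by an iterative sift-down loop (accumulator style);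
-- same snapshot sequence, objective: alternative decomposition, no speed claim.
-- A mutates its argument in place (B does too); the equivalence proved here is about the yielded sequence only.

-- ===== PORT A =====

-- simultaneous assignment arr[i], arr[j] = arr[j], arr[i] (indices are always in range here)
def pvSwap (arr : List Int) (i j : Int) : List Int :=
  let vi := (PySem.List.pyGet? arr i).getD 0
  let vj := (PySem.List.pyGet? arr j).getD 0
  (arr.set i.toNat vj).set j.toNat vi

-- _gen_heapify: recursion on `largest`, given enough fuel (recursion depth < n ≤ fuel; fuel never runs out on real calls)
def heapifyA : Nat → List Int → Int → Int → List Int × List (List Int × Int × Int)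
  | 0, arr, _, _ => (arr, [])
  | fuel+1, arr, n, i =>
    let l := 2*i + 1
    let r := 2*i + 2
    let largest1 := if l < n ∧ (PySem.List.pyGet? arr l).getD 0 > (PySem.List.pyGet? arr i).getD 0 then l else i
    let largest := if r < n ∧ (PySem.List.pyGet? arr r).getD 0 > (PySem.List.pyGet? arr largest1).getD 0 then r else largest1
    if largest ≠ i then
      let arr' := pvSwap arr i largest
      let res := heapifyA fuel arr' n largest
      (res.1, (arr', i, largest) :: res.2)
    else (arr, [])

-- first loop: for i in range(n//2 - 1, -1, -1): yield from _gen_heapify(arr, n, i)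
def buildLoopA (n : Int) : List Int → List Int → List Int × List (List Int × Int × Int)
  | arr, [] => (arr, [])
  | arr, i :: rest =>
    let res := heapifyA (n.toNat + 1) arr n i
    let res2 := buildLoopA n res.1 rest
    (res2.1, res.2 ++ res2.2)

-- second loop: swap, yield snapshot, heapify prefix
def extractLoopA (n : Int) : List Int → List Int → List Int × List (List Int × Int × Int)
  | arr, [] => (arr, [])
  | arr, i :: rest =>
    let arr1 := pvSwap arr 0 i
    let res := heapifyA (i.toNat + 1) arr1 i 0
    let res2 := extractLoopA n res.1 rest
    (res2.1, (arr1, 0, i) :: (res.2 ++ res2.2))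

def gen_heap_sort_py (arr : List Int) : List (List Int × Int × Int) :=
  let n : Int := arr.length
  let built := buildLoopA n arr (PySem.List.pyRange (PySem.Int.floordiv n 2 - 1) (-1) (-1))
  let final := extractLoopA n built.1 (PySem.List.pyRange (n - 1) 0 (-1))
  built.2 ++ final.2

-- ===== PORT B =====
-- iterative sift-down: while-loop as tail recursion with an event accumulator (events collected in reverse)
def siftLoopB : Nat → List Int → Int → Int → List (List Int × Int × Int) → List Int × List (List Int × Int × Int)
  | 0, arr, _, _, acc => (arr, acc)
  | fuel+1, arr, i, n, acc =>
    let l := 2*i + 1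
    let r := 2*i + 2
    let largest1 := if l < n ∧ (PySem.List.pyGet? arr l).getD 0 > (PySem.List.pyGet? arr i).getD 0 then l else i
    let largest := if r < n ∧ (PySem.List.pyGet? arr r).getD 0 > (PySem.List.pyGet? arr largest1).getD 0 then r else largest1
    if largest = i then (arr, acc)
    else
      let arr' := pvSwap arr i largest
      siftLoopB fuel arr' largest n ((arr', i, largest) :: acc)

def siftDownB (arr : List Int) (i n : Int) : List Int × List (List Int × Int × Int) :=
  let res := siftLoopB (n.toNat + 1) arr i n []
  (res.1, res.2.reverse)

def gen_heap_sort_py_alt (arr : List Int) : List (List Int × Int × Int) :=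
  let n : Int := arr.length
  let built := (PySem.List.pyRange (PySem.Int.floordiv n 2 - 1) (-1) (-1)).foldl
    (fun st start =>
      let r := siftDownB st.1 start n
      (r.1, st.2 ++ r.2)) (arr, [])
  let final := (PySem.List.pyRange (n - 1) 0 (-1)).foldl
    (fun st e =>
      let a1 := pvSwap st.1 0 e
      let r := siftDownB a1 0 e
      (r.1, st.2 ++ (a1, 0, e) :: r.2)) built
  final.2

-- ===== PRECONDITION & SPEC =====
def Spec_gen_heap_sort_py (arr : List Int) (out : List (List Int × Int × Int)) : Prop := out = gen_heap_sort_py_alt arr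
instance (arr : List Int) (out : List (List Int × Int × Int)) : Decidable (Spec_gen_heap_sort_py arr out) := by unfold Spec_gen_heap_sort_py; infer_instance

-- ===== CLAIM (what is proved, stated in full; the proofs are below) =====
def Claim_equal_gen_heap_sort_py : Prop := ∀ (arr : List Int), Dom_gen_heap_sort_py arr → Spec_gen_heap_sort_py arr (gen_heap_sort_py arr)

-- ===== LEMMAS AND PROOFS =====

-- proof-side name for the `largest` both ports compute
def pvL (arr : List Int) (n i : Int) : Int :=
  let l := 2*i + 1
  let r := 2*i + 2
  let largest1 := if l < n ∧ (PySem.List.pyGet? arr l).getD 0 > (PySem.List.pyGet? arr i).getD 0 then l else i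
  if r < n ∧ (PySem.List.pyGet? arr r).getD 0 > (PySem.List.pyGet? arr largest1).getD 0 then r else largest1

theorem heapifyA_succ (fuel : Nat) (arr : List Int) (n i : Int) :
    heapifyA (fuel+1) arr n i =
      if pvL arr n i ≠ i then
        ((heapifyA fuel (pvSwap arr i (pvL arr n i)) n (pvL arr n i)).1,
         (pvSwap arr i (pvL arr n i), i, pvL arr n i) ::
           (heapifyA fuel (pvSwap arr i (pvL arr n i)) n (pvL arr n i)).2)
      else (arr, []) := rfl

theorem siftLoopB_succ (fuel : Nat) (arr : List Int) (i n : Int)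
    (acc : List (List Int × Int × Int)) :
    siftLoopB (fuel+1) arr i n acc =
      if pvL arr n i = i then (arr, acc)
      else siftLoopB fuel (pvSwap arr i (pvL arr n i)) (pvL arr n i) n
        ((pvSwap arr i (pvL arr n i), i, pvL arr n i) :: acc) := rfl

theorem sift_eq : ∀ (fuel : Nat) (arr : List Int) (n i : Int)
    (acc : List (List Int × Int × Int)),
    siftLoopB fuel arr i n acc
      = ((heapifyA fuel arr n i).1, (heapifyA fuel arr n i).2.reverse ++ acc)
  | 0, arr, n, i, acc => by simp [siftLoopB, heapifyA]
  | fuel+1, arr, n, i, acc => by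
    rw [siftLoopB_succ, heapifyA_succ]
    by_cases h : pvL arr n i = i
    · simp [h]
    · simp [h, sift_eq fuel]

theorem siftDownB_eq (arr : List Int) (i n : Int) :
    siftDownB arr i n = heapifyA (n.toNat + 1) arr n i := by
  simp [siftDownB, sift_eq]

theorem build_eq (n : Int) : ∀ (idxs : List Int)
    (p : List Int × List (List Int × Int × Int)),
    idxs.foldl (fun st start =>
        ((siftDownB st.1 start n).1, st.2 ++ (siftDownB st.1 start n).2)) p
      = ((buildLoopA n p.1 idxs).1, p.2 ++ (buildLoopA n p.1 idxs).2)
  | [], p => by simp [buildLoopA]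
  | i :: rest, p => by
    rw [List.foldl_cons, build_eq n rest]
    simp [buildLoopA, siftDownB_eq]

theorem extract_eq (n : Int) : ∀ (idxs : List Int)
    (p : List Int × List (List Int × Int × Int)),
    idxs.foldl (fun st e =>
        ((siftDownB (pvSwap st.1 0 e) 0 e).1,
         st.2 ++ (pvSwap st.1 0 e, 0, e) :: (siftDownB (pvSwap st.1 0 e) 0 e).2)) p
      = ((extractLoopA n p.1 idxs).1, p.2 ++ (extractLoopA n p.1 idxs).2)
  | [], p => by simp [extractLoopA]
  | i :: rest, p => by
    rw [List.foldl_cons, extract_eq n rest]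
    simp [extractLoopA, siftDownB_eq]

-- ===== VERDICT (by name: the statement is the Claim_ definition above) =====
theorem gen_heap_sort_py_spec : Claim_equal_gen_heap_sort_py := by
  intro arr _
  unfold Spec_gen_heap_sort_py gen_heap_sort_py gen_heap_sort_py_alt
  simp only [build_eq]
  rw [extract_eq ((arr.length : Int))]
  simp
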